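-- pv_equiv track=rewrite | github.com/Yukun4119/spam_classification | src/spamClassification.py | findAttrH
-- ===== SOURCE A (Python) =====
-- def findAttrH(s):
-- 	andFlag = 0
-- 	for cha in s:
-- 		if cha == '&':
-- 			andFlag = 1
-- 		if cha == ';':
-- 			if andFlag == 1:
-- 				return 1
-- 			else:
-- 				return 0
-- 	return 0
-- ===== SOURCE B (Python) =====
-- def findAttrH(s):
--     semi = s.find(';')
--     if semi == -1:
--         return 0
--     amp = s.find('&')
--     return 1 if amp != -1 and amp < semi else 0
-- ===== Notes on version B (the rewrite author's own statement) =====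
-- stated objective: simpler
-- what changed: Replaced the flag-tracking character loop with two str.find index lookups (first ';' and first '&') and a single index comparison.
import Mathlib
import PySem

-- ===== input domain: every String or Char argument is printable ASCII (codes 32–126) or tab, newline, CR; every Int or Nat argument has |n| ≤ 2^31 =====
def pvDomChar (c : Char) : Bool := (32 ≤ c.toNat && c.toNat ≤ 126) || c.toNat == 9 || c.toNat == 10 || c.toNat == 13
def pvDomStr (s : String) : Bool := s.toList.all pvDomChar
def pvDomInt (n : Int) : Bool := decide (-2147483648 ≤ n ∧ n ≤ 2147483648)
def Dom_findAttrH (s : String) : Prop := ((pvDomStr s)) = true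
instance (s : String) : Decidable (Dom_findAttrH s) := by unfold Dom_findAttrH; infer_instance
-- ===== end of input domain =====

-- B replaces A's flag-tracking character loop by two first-index lookups (str.find) and one comparison (objective: simpler).
-- ===== PORT A =====
def findAttrHGo : List Char → Int → Int
  | [], _ => 0
  | cha :: rest, andFlag =>
    let andFlag := if cha = '&' then 1 else andFlag
    if cha = ';' then (if andFlag = 1 then (1 : Int) else 0)
    else findAttrHGo rest andFlag

def findAttrH (s : String) : Int := findAttrHGo s.toList 0

-- ===== PORT B =====
def findAttrH_alt (s : String) : Int :=
  let semi := PySem.Str.find s ";"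
  if semi = -1 then 0
  else
    let amp := PySem.Str.find s "&"
    if amp ≠ -1 ∧ amp < semi then 1 else 0

-- ===== PRECONDITION & SPEC =====
def Spec_findAttrH (s : String) (out : Int) : Prop := out = findAttrH_alt s
instance (s : String) (out : Int) : Decidable (Spec_findAttrH s out) := by unfold Spec_findAttrH; infer_instance

-- ===== CLAIM (what is proved, stated in full; the proofs are below) =====
def Claim_equal_findAttrH : Prop := ∀ (s : String), Dom_findAttrH s → Spec_findAttrH s (findAttrH s)

-- ===== LEMMAS AND PROOFS =====

-- singleton-prefix helper: [c] is a prefix of t iff t starts with c.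
theorem singleton_prefix_iff (c : Char) (t : List Char) : [c] <+: t ↔ t.head? = some c := by
  cases t with
  | nil => simp
  | cons a t => simp [List.cons_prefix_iff, eq_comm]

-- findIdx is minimal: it is ≤ any index whose element satisfies the (equality) predicate.
theorem findIdx_le_of_getElem (l : List Char) (c : Char) (n : Nat) (h : n < l.length)
    (hp : l[n] = c) : l.findIdx (· = c) ≤ n := by
  by_contra hlt
  have := List.not_of_lt_findIdx (xs := l) (p := (· = c)) (i := n) (by omega)
  simp only [decide_eq_false_iff_not] at this
  exact this hp

-- find for a single-character needle is the first index of that character (or -1).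
theorem find_singleton (l : List Char) (c : Char) :
    PySem.Chars.find l [c] = if c ∈ l then (l.findIdx (· = c) : Int) else -1 := by
  by_cases hm : c ∈ l
  · simp only [hm, if_true]
    have hinf : [c] <:+: l := by
      obtain ⟨t₁, t₂, h⟩ := List.append_of_mem hm
      exact ⟨t₁, t₂, by simp [h]⟩
    have hnn : 0 ≤ PySem.Chars.find l [c] := (PySem.Chars.find_nonneg_iff l [c]).2 hinf
    obtain ⟨hpre, hmin⟩ := PySem.Chars.find_spec hnn
    set n := (PySem.Chars.find l [c]).toNat with hn
    have hle : PySem.Chars.find l [c] ≤ l.length := PySem.Chars.find_le_length l [c]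
    have hnlt : n < l.length := by
      rcases lt_or_eq_of_le hle with h | h
      · omega
      · exfalso
        rw [singleton_prefix_iff] at hpre
        simp [hn, h] at hpre
    have hget : l[n] = c := by
      rw [singleton_prefix_iff, List.head?_drop, List.getElem?_eq_getElem hnlt] at hpre
      simpa using hpre
    have hidx_le : l.findIdx (· = c) ≤ n := findIdx_le_of_getElem l c n hnlt hget
    have hidx_ge : n ≤ l.findIdx (· = c) := by
      by_contra h
      have hlt : l.findIdx (· = c) < l.length :=
        List.findIdx_lt_length.2 ⟨c, hm, by simp⟩
      have hp : l[l.findIdx (· = c)] = c := by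
        have := List.findIdx_getElem (w := hlt) (p := (· = c)) (xs := l)
        simpa using this
      have hlt2 : l.findIdx (· = c) < n := by omega
      exact hmin _ hlt2 (by
        rw [singleton_prefix_iff, List.head?_drop, List.getElem?_eq_getElem hlt]
        simp [hp])
    have : n = l.findIdx (· = c) := Nat.le_antisymm hidx_ge hidx_le
    have h0 := Int.toNat_of_nonneg hnn
    omega
  · simp only [hm, if_false]
    refine (PySem.Chars.find_eq_neg_one_iff l [c]).2 ?_
    intro hinf
    exact hm (hinf.subset (by simp))

-- the loop with the flag already set returns 1 iff a ';' occurs.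
theorem goA_flag_one (l : List Char) :
    findAttrHGo l 1 = if ';' ∈ l then 1 else 0 := by
  induction l with
  | nil => simp [findAttrHGo]
  | cons c l ih =>
    by_cases hc : c = ';'
    · simp [findAttrHGo, hc]
    · by_cases ha : c = '&' <;>
        simp [findAttrHGo, hc, ha, ih, List.mem_cons, Ne.symm hc]

-- characterisation of the loop started with flag 0.
theorem goA_zero (l : List Char) :
    findAttrHGo l 0 =
      if ';' ∈ l ∧ '&' ∈ l ∧ l.findIdx (· = '&') < l.findIdx (· = ';') then 1 else 0 := by
  induction l with
  | nil => simp [findAttrHGo]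
  | cons c l ih =>
    by_cases hc : c = ';'
    · have hca : c ≠ '&' := by rw [hc]; decide
      rw [show findAttrHGo (c :: l) 0 = 0 by simp [findAttrHGo, hc]]
      rw [if_neg]
      rintro ⟨-, -, hlt⟩
      rw [List.findIdx_cons, List.findIdx_cons] at hlt
      simp [hc] at hlt
    · by_cases ha : c = '&'
      · rw [show findAttrHGo (c :: l) 0 = findAttrHGo l 1 by simp [findAttrHGo, ha],
          goA_flag_one]
        rw [List.findIdx_cons, List.findIdx_cons]
        by_cases hs : ';' ∈ l
        · rw [if_pos hs, if_pos]
          refine ⟨List.mem_cons_of_mem _ hs, by simp [ha], ?_⟩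
          simp [ha]
        · rw [if_neg hs, if_neg]
          rintro ⟨hmem, -, -⟩
          rcases List.mem_cons.1 hmem with h | h
          · exact hc h.symm
          · exact hs h
      · rw [show findAttrHGo (c :: l) 0 = findAttrHGo l 0 by simp [findAttrHGo, ha, hc], ih]
        rw [List.findIdx_cons, List.findIdx_cons]
        simp only [show (decide (c = ';')) = false by simp [hc],
          show (decide (c = '&')) = false by simp [ha], cond_false]
        congr 1
        simp only [List.mem_cons, eq_iff_iff]
        constructor
        · rintro ⟨h1, h2, h3⟩; exact ⟨Or.inr h1, Or.inr h2, by omega⟩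
        · rintro ⟨h1, h2, h3⟩
          refine ⟨h1.resolve_left (fun h => hc h.symm),
            h2.resolve_left (fun h => ha h.symm), by omega⟩

-- ===== VERDICT (by name: the statement is the Claim_ definition above) =====
theorem findAttrH_spec : Claim_equal_findAttrH := by
  intro s _
  unfold Spec_findAttrH findAttrH findAttrH_alt
  rw [goA_zero]
  have hsemi := find_singleton s.toList ';'
  have hamp := find_singleton s.toList '&'
  simp only [PySem.Str.find_eq]
  have h1 : (";" : String).toList = [';'] := by decide
  have h2 : ("&" : String).toList = ['&'] := by decide
  simp only [h1, h2, hsemi, hamp]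
  by_cases hs : ';' ∈ s.toList <;> by_cases ha : '&' ∈ s.toList <;>
    simp only [hs, ha, if_true, if_false, true_and, false_and, and_false] <;>
    split_ifs <;> first | omega | exact ‹False›.elim
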